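-- pv_equiv track=rewrite | github.com/vabresto/vb-kb | kb/enrichment_playwright_fetch.py | _normalize_skool_entry
-- ===== SOURCE A (Python) =====
-- _SKOOL_IGNORED_PREFIXES = (
--     "show more",
--     "show less",
--     "see more",
--     "see less",
--     "view profile",
-- )
--
-- def _normalize_optional_text(value: object) -> str | None:
--     if not isinstance(value, str):
--         return None
--     normalized = " ".join(value.split())
--     if not normalized:
--         return None
--     return normalized
--
-- def _normalize_skool_entry(raw_value: str) -> str | None:
--     lines = [_normalize_optional_text(line) for line in raw_value.splitlines()]
--     cleaned = [line for line in lines if line is not None]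
--     if not cleaned:
--         return None
--     candidate = " | ".join(cleaned[:4])
--     lowered = candidate.lower()
--     if any(lowered.startswith(prefix) for prefix in _SKOOL_IGNORED_PREFIXES):
--         return None
--     if len(candidate) > 280:
--         candidate = candidate[:280].rstrip()
--     return candidate
-- ===== SOURCE B (Python) =====
-- _SKOOL_IGNORED_PREFIXES = (
--     "show more",
--     "show less",
--     "see more",
--     "see less",
--     "view profile",
-- )
--
-- def _normalize_skool_entry(raw_value: str) -> str | None:
--     # Single character-level state machine: builds the candidate directly in one
--     # pass, with no splitlines/split/join intermediate lists.
--     out = []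
--     in_word = False        # currently inside a word (previous char was a word char)
--     line_has_word = False  # current line has contributed at least one word
--     lines_done = 0         # completed non-empty lines already emitted
--     for ch in raw_value:
--         if ch == '\n' or ch == '\r':
--             in_word = False
--             if line_has_word:
--                 line_has_word = False
--                 lines_done += 1
--                 if lines_done == 4:
--                     break
--         elif ch == ' ' or ch == '\t':
--             in_word = False
--         else:
--             if not in_word:
--                 if line_has_word:
--                     out.append(' ')
--                 elif out:
--                     out.extend(' | ')
--                 in_word = True
--                 line_has_word = True
--             out.append(ch)
--     if not out:
--         return None
--     candidate = ''.join(out)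
--     if candidate.lower().startswith(_SKOOL_IGNORED_PREFIXES):
--         return None
--     if len(candidate) > 280:
--         candidate = candidate[:280].rstrip()
--     return candidate
-- ===== Notes on version B (the rewrite author's own statement) =====
-- stated objective: alternative
-- what changed: B replaces A's staged pipeline (splitlines, per-line split()/join, filter, slice, join) by a single character-level state machine that builds the candidate text in one pass and stops as soon as four non-empty lines are collected.
import Mathlib
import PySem

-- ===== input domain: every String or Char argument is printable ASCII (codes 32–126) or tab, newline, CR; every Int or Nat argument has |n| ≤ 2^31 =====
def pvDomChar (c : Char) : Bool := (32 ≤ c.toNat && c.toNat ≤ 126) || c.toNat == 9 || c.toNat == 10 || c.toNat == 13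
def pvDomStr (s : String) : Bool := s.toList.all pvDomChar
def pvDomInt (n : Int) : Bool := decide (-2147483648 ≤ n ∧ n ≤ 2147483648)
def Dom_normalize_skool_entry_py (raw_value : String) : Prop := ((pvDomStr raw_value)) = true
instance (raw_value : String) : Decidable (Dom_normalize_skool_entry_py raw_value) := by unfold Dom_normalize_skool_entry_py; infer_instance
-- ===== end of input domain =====

-- B replaces A's splitlines / per-line split-join / filter / slice pipeline by a single
-- character-level state machine that builds the candidate in one pass and stops after
-- four non-empty lines (alternative algorithm; same return value on the stated domain).

-- ===== PORT A =====
def pvSkoolIgnoredPrefixes : List String :=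
  ["show more", "show less", "see more", "see less", "view profile"]

-- _normalize_optional_text (value is always a str here, so the isinstance branch is never taken)
def pvNormalizeOptionalText (value : String) : Option String :=
  let normalized := PySem.Str.join " " (PySem.Str.split₀ value)
  if normalized = "" then none else some normalized

def normalize_skool_entry_py (raw_value : String) : Option String :=
  let lines := (PySem.Str.splitlines raw_value).map pvNormalizeOptionalText
  let cleaned := lines.filterMap id
  if cleaned = [] then none
  else
    let candidate := PySem.Str.join " | " (PySem.List.slice cleaned none (some 4))
    let lowered := PySem.Str.lower candidate
    if pvSkoolIgnoredPrefixes.any (fun p => PySem.Str.startswith lowered p) then none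
    else if PySem.Str.len candidate > 280 then
      some (PySem.Str.rstrip (PySem.Str.slice candidate none (some 280)))
    else some candidate

-- ===== PORT B =====
-- the character loop of Source B: state (out, in_word, line_has_word, lines_done); the
-- `break` at lines_done == 4 is the early return of `out`
def pvScan : List Char → List Char → Bool → Bool → Nat → List Char
  | [], out, _, _, _ => out
  | c :: rest, out, in_word, line_has_word, lines_done =>
      if c == '\n' || c == '\r' then
        if line_has_word then
          if lines_done + 1 == 4 then out
          else pvScan rest out false false (lines_done + 1)
        else pvScan rest out false false lines_done
      else if c == ' ' || c == '\t' then
        pvScan rest out false line_has_word lines_done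
      else if in_word then
        pvScan rest (out ++ [c]) true line_has_word lines_done
      else
        pvScan rest
          (if line_has_word then out ++ [' ', c]
           else if out.isEmpty then out ++ [c]
           else out ++ [' ', '|', ' ', c])
          true true lines_done

def normalize_skool_entry_py_alt (raw_value : String) : Option String :=
  let cs := pvScan raw_value.toList [] false false 0
  if cs.isEmpty then none
  else
    let candidate := String.ofList cs
    if pvSkoolIgnoredPrefixes.any (fun p => PySem.Str.startswith (PySem.Str.lower candidate) p) then none
    else if PySem.Str.len candidate > 280 then
      some (PySem.Str.rstrip (PySem.Str.slice candidate none (some 280)))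
    else some candidate

-- ===== PRECONDITION & SPEC =====
def Spec_normalize_skool_entry_py (raw_value : String) (out : Option String) : Prop := out = normalize_skool_entry_py_alt raw_value
instance (raw_value : String) (out : Option String) : Decidable (Spec_normalize_skool_entry_py raw_value out) := by unfold Spec_normalize_skool_entry_py; infer_instance

-- ===== CLAIM (what is proved, stated in full; the proofs are below) =====
def Claim_equal_normalize_skool_entry_py : Prop := ∀ (raw_value : String), Dom_normalize_skool_entry_py raw_value → Spec_normalize_skool_entry_py raw_value (normalize_skool_entry_py raw_value)

-- ===== LEMMAS AND PROOFS =====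

-- reference predicates and the compositional description both ports are reduced to
def pvBrk (c : Char) : Bool := c == '\n' || c == '\r'
def pvSp (c : Char) : Bool := c == ' ' || c == '\t'
-- words of one line (split on space/tab, empty pieces dropped)
def pvLW (l : List Char) : List (List Char) := (List.splitOnP pvSp l).filter (· ≠ [])
-- word-lists of the non-empty lines
def pvNel (lls : List (List Char)) : List (List (List Char)) := (lls.map pvLW).filter (· ≠ [])
-- render one line: words joined by single spaces
def pvR (ws : List (List Char)) : List Char := PySem.Chars.join [' '] ws
def pvSepcat (ws : List (List Char)) : List Char := ws.flatMap (fun w => ' ' :: w)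
-- remaining full lines, budget 4 - k, each preceded by " | "
def pvRestL (ls : List (List Char)) (k : Nat) : List Char :=
  ((pvNel ls).take (4 - k)).flatMap (fun ws => ' ' :: '|' :: ' ' :: pvR ws)
def pvGlueFirst (l : List Char) : Bool := match l with | [] => false | c :: _ => !pvSp c
-- remainder of the current line when it already has a word; iw: an open word glues on
def pvGlue (iw : Bool) (l : List Char) : List Char :=
  if iw && pvGlueFirst l then
    match pvLW l with | [] => [] | w :: ws => w ++ pvSepcat ws
  else pvSepcat (pvLW l)
-- the whole candidate text
def pvTop (lls : List (List Char)) : List Char :=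
  PySem.Chars.join [' ', '|', ' '] (((pvNel lls).take 4).map pvR)
-- A-side intermediate: split₀ of each line, blank lines dropped
def pvFiltS (lls : List (List Char)) : List (List (List Char)) :=
  (lls.map PySem.Chars.split₀).filter (fun ws => PySem.Chars.join [' '] ws ≠ [])

lemma pvCharEqNat (a b : Char) : (a = b) ↔ a.toNat = b.toNat := by
  rw [Char.ext_iff, ← UInt32.toNat_inj]; rfl

lemma pv_isspace_eq (c : Char) (h : pvDomChar c = true) (h2 : pvBrk c = false) :
    PySem.Chars.isspace c = pvSp c := by
  have e1 : ('\n').toNat = 10 := rfl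
  have e2 : ('\r').toNat = 13 := rfl
  have e3 : (' ').toNat = 32 := rfl
  have e4 : ('\t').toNat = 9 := rfl
  revert h h2
  rw [Bool.eq_iff_iff (b := pvSp c)]
  simp only [pvDomChar, pvBrk, pvSp, PySem.Chars.isspace, Bool.or_eq_true, Bool.or_eq_false_iff,
    Bool.and_eq_true, decide_eq_true_eq, beq_iff_eq, beq_eq_false_iff_ne, ne_eq,
    pvCharEqNat, e1, e2, e3, e4]
  intro h h2; constructor <;> intro hx <;> omega

lemma pv_split₀go (l : List Char) :
    ∀ (cur : List Char) (acc : List (List Char)),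
    (∀ c ∈ l, PySem.Chars.isspace c = pvSp c) →
    PySem.Chars.split₀.go l cur acc
      = acc.reverse ++ ((List.splitOnP pvSp l).modifyHead (cur.reverse ++ ·)).filter (· ≠ []) := by
  induction l with
  | nil =>
      intro cur acc _
      by_cases hc : cur = []
      · simp [PySem.Chars.split₀.go, hc, List.splitOnP_nil]
      · simp [PySem.Chars.split₀.go, hc, List.splitOnP_nil, List.isEmpty_iff]
  | cons c rest ih =>
      intro cur acc h
      have hc := h c (by simp)
      have hid : List.modifyHead (fun x : List Char => x) (List.splitOnP pvSp rest)
          = List.splitOnP pvSp rest := by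
        cases h' : List.splitOnP pvSp rest <;> simp
      by_cases hs : pvSp c = true
      · rw [show PySem.Chars.split₀.go (c :: rest) cur acc
            = if cur.isEmpty then PySem.Chars.split₀.go rest [] acc
              else PySem.Chars.split₀.go rest [] (cur.reverse :: acc) from by
              simp [PySem.Chars.split₀.go, hc, hs]]
        rw [List.splitOnP_cons]
        simp only [hs, if_true]
        by_cases hcur : cur = []
        · rw [ih [] acc (fun c hc => h c (by simp [hc]))]
          simp [hcur, hid]
        · rw [ih [] (cur.reverse :: acc) (fun c hc => h c (by simp [hc]))]
          simp [hcur, List.isEmpty_iff, hid]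
      · rw [show PySem.Chars.split₀.go (c :: rest) cur acc
            = PySem.Chars.split₀.go rest (c :: cur) acc from by
              simp [PySem.Chars.split₀.go, hc, hs]]
        rw [ih (c :: cur) acc (fun c hc => h c (by simp [hc])), List.splitOnP_cons]
        simp only [hs, Bool.false_eq_true, if_false, List.modifyHead_modifyHead]
        have hfun : ((fun x : List Char => cur.reverse ++ x) ∘ List.cons c)
            = (fun x : List Char => (c :: cur).reverse ++ x) := by
          funext x; simp
        rw [hfun]

lemma pvFiltS_append (a b : List (List Char)) : pvFiltS (a ++ b) = pvFiltS a ++ pvFiltS b := by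
  simp [pvFiltS]

lemma pv_split0_nil : PySem.Chars.split₀ ([] : List Char) = [] := by decide

lemma pv_goLines (isB : Char → Bool) :
    ∀ (n : Nat) (cs : List Char), cs.length ≤ n →
    ∀ (cur : List Char) (acc : List (List Char)),
    (∀ c ∈ cs, isB c = pvBrk c) →
    pvFiltS (PySem.Chars.splitlines.go isB cs cur acc)
      = pvFiltS acc.reverse
        ++ pvFiltS ((List.splitOnP pvBrk cs).modifyHead (cur.reverse ++ ·)) := by
  intro n
  induction n with
  | zero =>
      intro cs hlen cur acc _
      have : cs = [] := List.eq_nil_of_length_eq_zero (Nat.le_zero.mp hlen)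
      subst this
      rw [PySem.Chars.splitlines.go.eq_1, List.splitOnP_nil]
      by_cases hc : cur = []
      · simp [hc, pvFiltS, pv_split0_nil]
      · simp [List.isEmpty_iff, hc, pvFiltS_append]
  | succ n ih =>
      intro cs hlen cur acc h
      have h0 : PySem.Chars.split₀ ([] : List Char) = [] := by decide
      have hid : ∀ (l : List (List Char)), List.modifyHead (fun x : List Char => x) l = l :=
        fun l => by cases l <;> simp
      rcases cs with _ | ⟨c, rest⟩
      · rw [PySem.Chars.splitlines.go.eq_1, List.splitOnP_nil]
        by_cases hc : cur = []
        · simp [hc, pvFiltS, pv_split0_nil]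
        · simp [List.isEmpty_iff, hc, pvFiltS_append]
      · by_cases hpair : c = '\r' ∧ ∃ rest', rest = '\n' :: rest'
        · obtain ⟨hc', ⟨rest', hrest'⟩⟩ := hpair
          subst hc'; subst hrest'
          rw [PySem.Chars.splitlines.go.eq_2]
          rw [ih rest' (by simp at hlen ⊢; omega) [] (cur.reverse :: acc)
              (fun c hc => h c (by simp [hc]))]
          rw [List.splitOnP_cons, List.splitOnP_cons]
          have hbr : pvBrk '\r' = true := by decide
          have hbn : pvBrk '\n' = true := by decide
          simp only [hbr, hbn, if_true]
          (simp [pvFiltS, hid, List.filter_cons]); (split_ifs <;> simp_all)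
        · have hguard : (∀ (rest_1 : List Char), c = '\r' → rest = '\n' :: rest_1 → False) :=
            fun r1 h1 h2 => hpair ⟨h1, r1, h2⟩
          rw [PySem.Chars.splitlines.go.eq_3 isB cur acc c rest hguard]
          have hc := h c (by simp)
          rw [List.splitOnP_cons]
          by_cases hb : pvBrk c = true
          · rw [if_pos (by rw [hc, hb])]
            rw [ih rest (by simp at hlen ⊢; omega) [] (cur.reverse :: acc)
                (fun c hc => h c (by simp [hc]))]
            simp only [hb, if_true]
            (simp [pvFiltS, hid, List.filter_cons]); (split_ifs <;> simp_all)
          · rw [if_neg (by rw [hc]; simp [hb])]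
            rw [ih rest (by simp at hlen ⊢; omega) (c :: cur) acc
                (fun c hc => h c (by simp [hc]))]
            simp only [hb, Bool.false_eq_true, if_false, List.modifyHead_modifyHead]
            congr 3
            funext x
            simp

lemma pv_joinFlat (sep : List Char) :
    ∀ (xs : List (List Char)) (x : List Char),
      List.intercalate sep (x :: xs) = x ++ xs.flatMap (sep ++ ·) := by
  intro xs
  induction xs with
  | nil => intro x; simp [List.intercalate]
  | cons y ys ih =>
      intro x
      simp only [List.intercalate, List.intersperse, List.flatten_cons] at ih ⊢
      simp [ih y]

lemma pvR_cons (w : List Char) (ws : List (List Char)) :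
    pvR (w :: ws) = w ++ pvSepcat ws := by
  rw [pvR, PySem.Chars.join, pv_joinFlat]
  simp [pvSepcat]

lemma pvLW_decomp (l : List Char) :
    (pvGlueFirst l = true → ∃ p ps, List.splitOnP pvSp l = p :: ps ∧ p ≠ []) ∧
    (pvGlueFirst l = false → ∃ ps, List.splitOnP pvSp l = [] :: ps) := by
  cases l with
  | nil => simp [pvGlueFirst, List.splitOnP_nil]
  | cons c t =>
      obtain ⟨p, ps, hps⟩ : ∃ p ps, List.splitOnP pvSp t = p :: ps := by
        cases hh : List.splitOnP pvSp t with
        | nil => exact absurd hh (List.splitOnP_ne_nil _ _)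
        | cons a b => exact ⟨a, b, rfl⟩
      by_cases h : pvSp c = true
      · refine ⟨fun hg => ?_, fun _ => ⟨List.splitOnP pvSp t, by simp [List.splitOnP_cons, h]⟩⟩
        simp [pvGlueFirst, h] at hg
      · refine ⟨fun _ => ?_, fun hg => ?_⟩
        · rw [List.splitOnP_cons]
          simp only [h, Bool.false_eq_true, if_false]
          exact ⟨c :: p, ps, by simp [hps], by simp⟩
        · simp [pvGlueFirst, h] at hg

lemma pvLW_nil : pvLW [] = [] := by simp [pvLW, List.splitOnP_nil]

lemma pvLW_cons_sp (c : Char) (l : List Char) (h : pvSp c = true) : pvLW (c :: l) = pvLW l := by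
  simp [pvLW, List.splitOnP_cons, h]

lemma pvLW_cons_w (c : Char) (l p1 : List Char) (ps : List (List Char))
    (h : pvSp c = false) (hsp : List.splitOnP pvSp l = p1 :: ps) :
    pvLW (c :: l) = (c :: p1) :: ps.filter (· ≠ []) := by
  simp [pvLW, List.splitOnP_cons, h, hsp]

lemma pvGlue_nil (iw : Bool) : pvGlue iw [] = [] := by
  cases iw <;> simp [pvGlue, pvGlueFirst, pvLW_nil, pvSepcat]

lemma pvGlue_false (l : List Char) : pvGlue false l = pvSepcat (pvLW l) := by
  simp [pvGlue]

lemma pvGlue_true (l p1 : List Char) (ps : List (List Char))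
    (hsp : List.splitOnP pvSp l = p1 :: ps) :
    pvGlue true l = p1 ++ pvSepcat (ps.filter (· ≠ [])) := by
  by_cases hg : pvGlueFirst l = true
  · obtain ⟨p, ps', hsp', hp⟩ := (pvLW_decomp l).1 hg
    rw [hsp] at hsp'
    obtain ⟨rfl, rfl⟩ : p1 = p ∧ ps = ps' := by
      injection hsp' with h1 h2; exact ⟨h1.symm ▸ rfl, h2 ▸ rfl⟩
    have hlw : pvLW l = p1 :: ps.filter (· ≠ []) := by
      simp [pvLW, hsp, hp]
    simp [pvGlue, hg, hlw]
  · obtain ⟨ps', hsp'⟩ := (pvLW_decomp l).2 (by simpa using hg)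
    rw [hsp] at hsp'
    obtain ⟨rfl, rfl⟩ : p1 = [] ∧ ps = ps' := by
      injection hsp' with h1 h2; exact ⟨h1.symm ▸ rfl, h2 ▸ rfl⟩
    have hlw : pvLW l = ps.filter (· ≠ []) := by
      simp [pvLW, hsp]
    simp [pvGlue, hg, hlw]

lemma pvNel_cons (l : List Char) (ls : List (List Char)) :
    pvNel (l :: ls) = if pvLW l = [] then pvNel ls else pvLW l :: pvNel ls := by
  rw [pvNel, List.map_cons, List.filter_cons]
  split_ifs with h <;> simp_all [pvNel]

lemma pvRestL_skip (l : List Char) (ls : List (List Char)) (k : Nat) (h : pvLW l = []) :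
    pvRestL (l :: ls) k = pvRestL ls k := by
  simp [pvRestL, pvNel_cons, h]

lemma pvRestL_cons (l : List Char) (ls : List (List Char)) (k : Nat)
    (h : pvLW l ≠ []) (hk : k ≤ 3) :
    pvRestL (l :: ls) k = ' ' :: '|' :: ' ' :: pvR (pvLW l) ++ pvRestL ls (k + 1) := by
  have h4 : 4 - k = (4 - (k + 1)) + 1 := by omega
  simp [pvRestL, pvNel_cons, h, h4, List.take_succ_cons]

lemma pvRestL_zero_budget (ls : List (List Char)) : pvRestL ls 4 = [] := by
  simp [pvRestL]

lemma pvTop_skip (l : List Char) (ls : List (List Char)) (h : pvLW l = []) :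
    pvTop (l :: ls) = pvTop ls := by
  simp [pvTop, pvNel_cons, h]

lemma pvTop_cons (l : List Char) (ls : List (List Char)) (h : pvLW l ≠ []) :
    pvTop (l :: ls) = pvR (pvLW l) ++ pvRestL ls 1 := by
  rw [pvTop, pvNel_cons, if_neg h, List.take_succ_cons, List.map_cons,
      PySem.Chars.join, pv_joinFlat]
  congr 1
  rw [pvRestL, List.flatMap_map]
  rfl

lemma pvScan_master :
    ∀ (rest out : List Char) (iw lhw : Bool) (k : Nat) (l : List Char) (ls : List (List Char)),
      List.splitOnP pvBrk rest = l :: ls →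
      (iw = true → lhw = true) → (lhw = true → out ≠ []) →
      (out = [] → (k = 0 ∧ lhw = false)) → k ≤ 3 →
      pvScan rest out iw lhw k =
        out ++ (if lhw then pvGlue iw l ++ pvRestL ls (k + 1)
                else if out.isEmpty then pvTop (l :: ls)
                else pvRestL (l :: ls) k) := by
  intro rest
  induction rest with
  | nil =>
      intro out iw lhw k l ls hsp h1 h2 h3 hk
      rw [List.splitOnP_nil] at hsp
      obtain ⟨rfl, rfl⟩ : l = [] ∧ ls = [] := by
        injection hsp with ha hb; exact ⟨ha.symm ▸ rfl, hb ▸ rfl⟩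
      cases lhw with
      | true => simp [pvScan, pvGlue_nil, pvRestL, pvNel]
      | false =>
          by_cases ho : out = []
          · simp [pvScan, ho, pvTop, pvNel, pvLW_nil]
          · simp [pvScan, List.isEmpty_iff, ho, pvRestL, pvNel, pvLW_nil]
  | cons c r ih =>
      intro out iw lhw k l ls hsp h1 h2 h3 hk
      obtain ⟨l', ls', hsp'⟩ : ∃ l' ls', List.splitOnP pvBrk r = l' :: ls' := by
        cases hh : List.splitOnP pvBrk r with
        | nil => exact absurd hh (List.splitOnP_ne_nil _ _)
        | cons a b => exact ⟨a, b, rfl⟩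
      rw [List.splitOnP_cons, hsp'] at hsp
      show (if (c == '\n' || c == '\r') = true then _ else _) = _
      by_cases hb : pvBrk c = true
      · rw [if_pos (by exact hb)]
        obtain ⟨rfl, rfl⟩ : l = [] ∧ ls = l' :: ls' := by
          rw [if_pos hb] at hsp
          injection hsp with ha hb'; exact ⟨ha.symm ▸ rfl, hb' ▸ rfl⟩
        cases lhw with
        | true =>
            have hout := h2 rfl
            rw [if_pos (show (true : Bool) = true from rfl)]
            by_cases h4 : k + 1 = 4
            · rw [if_pos (by simp [h4])]
              simp [pvGlue_nil, h4, pvRestL_zero_budget]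
            · rw [if_neg (by simp; omega)]
              rw [ih out false false (k + 1) l' ls' hsp' (by simp) (by simp)
                  (fun hh => absurd hh hout) (by omega)]
              simp [List.isEmpty_iff, hout, pvGlue_nil]
        | false =>
            rw [if_neg (show ¬((false : Bool) = true) by simp)]
            have hiw : iw = false := by
              cases iw with
              | true => exact absurd (h1 rfl) (by simp)
              | false => rfl
            subst hiw
            rw [ih out false false k l' ls' hsp' (by simp) (by simp)
                (fun hh => ⟨(h3 hh).1, rfl⟩) hk]
            by_cases ho : out = []
            · simp [ho, pvTop_skip _ _ pvLW_nil]
            · simp [List.isEmpty_iff, ho, pvRestL_skip _ _ _ pvLW_nil]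
      · rw [if_neg (by simpa [pvBrk] using hb)]
        rw [if_neg hb] at hsp
        simp only [List.modifyHead] at hsp
        obtain ⟨hl, hls⟩ : l = c :: l' ∧ ls = ls' := by
          injection hsp with ha hb'; exact ⟨ha.symm, hb'.symm⟩
        subst hl; rw [hls]
        by_cases hs : pvSp c = true
        · rw [if_pos (by exact hs)]
          rw [ih out false lhw k l' ls' hsp' (by simp) h2 h3 hk]
          cases lhw with
          | true =>
              simp only [if_true]
              rw [pvGlue_false]
              have : pvGlue iw (c :: l') = pvSepcat (pvLW (c :: l')) := by
                cases iw
                · exact pvGlue_false _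
                · simp [pvGlue, pvGlueFirst, hs]
              rw [this, pvLW_cons_sp c l' hs]
          | false =>
              by_cases ho : out = []
              · subst ho
                have : pvTop (l' :: ls') = pvTop ((c :: l') :: ls') := by
                  by_cases hz : pvLW l' = []
                  · rw [pvTop_skip _ _ hz, pvTop_skip _ _ (by rw [pvLW_cons_sp c l' hs]; exact hz)]
                  · rw [pvTop_cons _ _ hz, pvTop_cons _ _ (by rw [pvLW_cons_sp c l' hs]; exact hz),
                        pvLW_cons_sp c l' hs]
                simp [this]
              · have : pvRestL (l' :: ls') k = pvRestL ((c :: l') :: ls') k := by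
                  by_cases hz : pvLW l' = []
                  · rw [pvRestL_skip _ _ _ hz, pvRestL_skip _ _ _ (by rw [pvLW_cons_sp c l' hs]; exact hz)]
                  · rw [pvRestL_cons _ _ _ hz hk, pvRestL_cons _ _ _ (by rw [pvLW_cons_sp c l' hs]; exact hz) hk,
                        pvLW_cons_sp c l' hs]
                simp only [List.isEmpty_iff, ho, if_false]
                rw [this]
                simp
        · -- word character
          rw [if_neg (by simpa [pvSp] using hs)]
          obtain ⟨p1, ps, hps⟩ : ∃ p1 ps, List.splitOnP pvSp l' = p1 :: ps := by
            cases hh : List.splitOnP pvSp l' with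
            | nil => exact absurd hh (List.splitOnP_ne_nil _ _)
            | cons a b => exact ⟨a, b, rfl⟩
          have hlwc : pvLW (c :: l') = (c :: p1) :: ps.filter (· ≠ []) :=
            pvLW_cons_w c l' p1 ps (by simpa using hs) hps
          have hglue : pvGlue true l' = p1 ++ pvSepcat (ps.filter (· ≠ [])) :=
            pvGlue_true l' p1 ps hps
          have hgluec : pvGlue true (c :: l') = (c :: p1) ++ pvSepcat (ps.filter (· ≠ [])) := by
            rw [pvGlue, if_pos (by simp [pvGlueFirst, hs]), hlwc]
          have hgluecf : pvGlue false (c :: l') = ' ' :: ((c :: p1) ++ pvSepcat (ps.filter (· ≠ []))) := by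
            rw [pvGlue_false, hlwc]
            simp [pvSepcat]
          cases iw with
          | true =>
              have hlhw := h1 rfl
              subst hlhw
              rw [if_pos rfl]
              rw [ih (out ++ [c]) true true k l' ls' hsp' (fun _ => rfl) (by simp) (by simp) hk]
              simp only [if_true]
              rw [hglue, hgluec]
              simp
          | false =>
              cases lhw with
              | true =>
                  rw [if_pos rfl]
                  rw [ih (out ++ [' ', c]) true true k l' ls' hsp' (fun _ => rfl) (by simp) (by simp) hk]
                  simp only [if_true]
                  rw [hglue, hgluecf]
                  simp
              | false =>
                  rw [if_neg (by simp), if_neg (by simp)]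
                  by_cases ho : out = []
                  · subst ho
                    rw [if_pos (by simp)]
                    have hk0 : k = 0 := (h3 rfl).1
                    subst hk0
                    rw [ih ([] ++ [c]) true true 0 l' ls' hsp' (fun _ => rfl) (by simp) (by simp) (by omega)]
                    simp only [List.isEmpty_nil, if_true, List.nil_append]
                    rw [pvTop_cons _ _ (by rw [hlwc]; simp), hlwc, pvR_cons, hglue]
                    simp
                  · rw [if_neg (by simpa [List.isEmpty_iff] using ho),
                        if_neg (by simpa [List.isEmpty_iff] using ho)]
                    rw [ih (out ++ [' ', '|', ' ', c]) true true k l' ls' hsp'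
                        (fun _ => rfl) (by simp) (by simp) hk]
                    simp only [if_true]
                    rw [if_neg (by simpa [List.isEmpty_iff] using ho)]
                    rw [pvRestL_cons _ _ _ (by rw [hlwc]; simp) hk, hlwc, pvR_cons, hglue]
                    simp


lemma pv_split₀_eq (l : List Char)
    (h : ∀ c ∈ l, pvDomChar c = true ∧ pvBrk c = false) :
    PySem.Chars.split₀ l = pvLW l := by
  rw [show PySem.Chars.split₀ l = PySem.Chars.split₀.go l [] [] from rfl]
  rw [pv_split₀go l [] [] (fun c hc => pv_isspace_eq c (h c hc).1 (h c hc).2)]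
  have hid : List.modifyHead (fun x : List Char => [].reverse ++ x) (List.splitOnP pvSp l)
      = List.splitOnP pvSp l := by
    cases h' : List.splitOnP pvSp l <;> simp
  rw [hid]
  simp [pvLW]

lemma pv_mem_splitOnP (p : Char → Bool) :
    ∀ (l piece : List Char), piece ∈ List.splitOnP p l → ∀ c ∈ piece, c ∈ l ∧ p c = false := by
  intro l
  induction l with
  | nil =>
      intro piece h
      rw [List.splitOnP_nil] at h
      simp at h
      subst h
      simp
  | cons a t ih =>
      intro piece h c hc
      rw [List.splitOnP_cons] at h
      by_cases hp : p a = true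
      · rw [if_pos hp] at h
        rcases List.mem_cons.mp h with h1 | h2
        · subst h1; simp at hc
        · have := ih piece h2 c hc
          exact ⟨by simp [this.1], this.2⟩
      · rw [if_neg hp] at h
        obtain ⟨p1, ps, hps⟩ : ∃ p1 ps, List.splitOnP p t = p1 :: ps := by
          cases hh : List.splitOnP p t with
          | nil => exact absurd hh (List.splitOnP_ne_nil _ _)
          | cons x y => exact ⟨x, y, rfl⟩
        rw [hps] at h
        simp only [List.modifyHead] at h
        rcases List.mem_cons.mp h with h1 | h2
        · subst h1
          rcases List.mem_cons.mp hc with rfl | hc'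
          · exact ⟨by simp, by simpa using hp⟩
          · have := ih p1 (by rw [hps]; exact List.mem_cons_self) c hc'
            exact ⟨by simp [this.1], this.2⟩
        · have := ih piece (by rw [hps]; exact List.mem_cons_of_mem _ h2) c hc
          exact ⟨by simp [this.1], this.2⟩

lemma pv_join_eq_nil (ws : List (List Char)) (h : [] ∉ ws) :
    PySem.Chars.join [' '] ws = [] ↔ ws = [] := by
  cases ws with
  | nil => simp [PySem.Chars.join, List.intercalate]
  | cons w ws' =>
      have hw : w ≠ [] := fun hh => h (by simp [hh])
      constructor
      · intro hj
        exact absurd hj (by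
          rw [show PySem.Chars.join [' '] (w :: ws') = pvR (w :: ws') from rfl, pvR_cons]
          simp [hw])
      · intro hh; cases hh

lemma pv_nil_notMem_pvLW (l : List Char) : [] ∉ pvLW l := by
  simp [pvLW, List.mem_filter]

lemma pv_filtS_eq_nel (cs : List Char) (h : ∀ c ∈ cs, pvDomChar c = true) :
    pvFiltS (List.splitOnP pvBrk cs) = pvNel (List.splitOnP pvBrk cs) := by
  rw [pvFiltS, pvNel]
  rw [List.map_congr_left (fun piece hp => pv_split₀_eq piece
      (fun c hc => ⟨h c (pv_mem_splitOnP pvBrk cs piece hp c hc).1,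
                    (pv_mem_splitOnP pvBrk cs piece hp c hc).2⟩))]
  apply List.filter_congr
  intro ws hws
  obtain ⟨piece, _, rfl⟩ := List.mem_map.mp hws
  have := pv_join_eq_nil (pvLW piece) (pv_nil_notMem_pvLW piece)
  simp [this]

lemma pv_cleaned :
    ∀ (L : List String),
      (L.filterMap pvNormalizeOptionalText).map String.toList
        = (pvFiltS (L.map String.toList)).map (PySem.Chars.join [' ']) := by
  intro L
  induction L with
  | nil => simp [pvFiltS]
  | cons v L ih =>
      have hjoin : (PySem.Str.join " " (PySem.Str.split₀ v)).toList
          = PySem.Chars.join [' '] (PySem.Chars.split₀ v.toList) := by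
        rw [PySem.Str.toList_join, PySem.Str.split₀_map_toList]
        rfl
      have hiff : (PySem.Str.join " " (PySem.Str.split₀ v) = "")
          ↔ PySem.Chars.join [' '] (PySem.Chars.split₀ v.toList) = [] := by
        rw [← hjoin, ← String.toList_eq_nil_iff]
      rw [List.filterMap_cons]
      by_cases hz : PySem.Chars.join [' '] (PySem.Chars.split₀ v.toList) = []
      · rw [show pvNormalizeOptionalText v = none from by
            simp [pvNormalizeOptionalText, hiff.mpr hz]]
        rw [ih]
        simp [pvFiltS, hz]
      · rw [show pvNormalizeOptionalText v = some (PySem.Str.join " " (PySem.Str.split₀ v)) from by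
            simp [pvNormalizeOptionalText]
            intro hh
            exact absurd (hiff.mp hh) hz]
        simp only [List.map_cons, pvFiltS, List.filter_cons]
        rw [if_pos (by simpa using hz)]
        simp only [List.map_cons]
        rw [hjoin, ih]
        rfl

-- the scan from the initial state computes the candidate text
lemma pv_scan_top (cs : List Char) :
    pvScan cs [] false false 0 = pvTop (List.splitOnP pvBrk cs) := by
  obtain ⟨l, ls, hsp⟩ : ∃ l ls, List.splitOnP pvBrk cs = l :: ls := by
    cases hh : List.splitOnP pvBrk cs with
    | nil => exact absurd hh (List.splitOnP_ne_nil _ _)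
    | cons a b => exact ⟨a, b, rfl⟩
  rw [pvScan_master cs [] false false 0 l ls hsp (by simp) (by simp)
      (fun _ => ⟨rfl, rfl⟩) (by omega), hsp]
  simp

lemma pv_top_ne_nil (lls : List (List Char)) (h : pvNel lls ≠ []) : pvTop lls ≠ [] := by
  rw [pvTop]
  cases hnel : pvNel lls with
  | nil => exact absurd hnel h
  | cons x xs =>
      have hx : x ∈ pvNel lls := by rw [hnel]; exact List.mem_cons_self
      have hx' : x ≠ [] ∧ [] ∉ x := by
        rw [pvNel] at hx
        obtain ⟨hmem, hne⟩ := List.mem_filter.mp hx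
        obtain ⟨piece, _, rfl⟩ := List.mem_map.mp hmem
        exact ⟨by simpa using hne, pv_nil_notMem_pvLW piece⟩
      cases hxc : x with
      | nil => exact absurd hxc hx'.1
      | cons w ws =>
          have hw : w ≠ [] := fun hh => hx'.2 (by rw [hxc, hh]; exact List.mem_cons_self)
          rw [List.take_succ_cons, List.map_cons, PySem.Chars.join, pv_joinFlat, pvR_cons]
          simp [hw]

lemma pv_main (raw : String) (h : pvDomStr raw = true) :
    normalize_skool_entry_py raw = normalize_skool_entry_py_alt raw := by
  have hdom : ∀ c ∈ raw.toList, pvDomChar c = true := by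
    intro c hc
    exact List.all_eq_true.mp h c hc
  -- A's cleaned list, as char lists, equals the rendered non-empty word lines
  have hclean : ((PySem.Str.splitlines raw).filterMap pvNormalizeOptionalText).map String.toList
      = (pvNel (List.splitOnP pvBrk raw.toList)).map pvR := by
    rw [pv_cleaned, PySem.Str.splitlines_map_toList]
    have hgo := pv_goLines (fun c =>
        have n := c.toNat;
        decide (n = 10) || decide (n = 13) || decide (n = 11) || decide (n = 12) ||
        decide (n = 28) || decide (n = 29) || decide (n = 30) || decide (n = 133) ||
        decide (n = 8232) || decide (n = 8233))
      raw.toList.length raw.toList (le_refl _) [] []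
      (fun c hc => by
        have hd := hdom c hc
        have e1 : ('\n').toNat = 10 := rfl
        have e2 : ('\r').toNat = 13 := rfl
        rw [Bool.eq_iff_iff]
        simp only [pvBrk, Bool.or_eq_true, decide_eq_true_eq, beq_iff_eq, pvCharEqNat, e1, e2]
        simp only [pvDomChar, Bool.or_eq_true, Bool.and_eq_true, decide_eq_true_eq,
          beq_iff_eq] at hd
        constructor <;> intro hx <;> omega)
    rw [show PySem.Chars.splitlines raw.toList = PySem.Chars.splitlines.go _ raw.toList [] [] from rfl]
    rw [hgo]
    have hid : List.modifyHead (fun x : List Char => [].reverse ++ x)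
        (List.splitOnP pvBrk raw.toList) = List.splitOnP pvBrk raw.toList := by
      cases h' : List.splitOnP pvBrk raw.toList <;> simp
    rw [hid]
    rw [show pvFiltS [].reverse = [] from rfl]
    rw [List.nil_append, pv_filtS_eq_nel raw.toList hdom]
    rfl
  have hscan : pvScan raw.toList [] false false 0 = pvTop (List.splitOnP pvBrk raw.toList) :=
    pv_scan_top raw.toList
  simp only [normalize_skool_entry_py, normalize_skool_entry_py_alt, List.filterMap_map,
    Function.comp_def, id]
  by_cases hc0 : (PySem.Str.splitlines raw).filterMap pvNormalizeOptionalText = []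
  · have hnel : pvNel (List.splitOnP pvBrk raw.toList) = [] := by
      have := hclean
      rw [hc0] at this
      simpa using this.symm
    have htop : pvTop (List.splitOnP pvBrk raw.toList) = [] := by
      rw [pvTop, hnel]
      simp [PySem.Chars.join, List.intercalate]
    rw [if_pos hc0, if_pos (by simp [hscan, htop])]
  · have hnel : pvNel (List.splitOnP pvBrk raw.toList) ≠ [] := by
      intro hh
      apply hc0
      have := hclean
      rw [hh] at this
      simpa using this
    have htop : pvTop (List.splitOnP pvBrk raw.toList) ≠ [] := pv_top_ne_nil _ hnel
    have hscanne : ¬(pvScan raw.toList [] false false 0).isEmpty = true := by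
      rw [hscan]
      simpa [List.isEmpty_iff] using htop
    have hcand : PySem.Str.join " | "
          (PySem.List.slice ((PySem.Str.splitlines raw).filterMap pvNormalizeOptionalText) none (some 4))
        = String.ofList (pvScan raw.toList [] false false 0) := by
      have hslice : PySem.List.slice ((PySem.Str.splitlines raw).filterMap pvNormalizeOptionalText)
          none (some 4)
          = ((PySem.Str.splitlines raw).filterMap pvNormalizeOptionalText).take 4 := by
        simpa using PySem.List.slice_to_natCast
          (xs := (PySem.Str.splitlines raw).filterMap pvNormalizeOptionalText) (b := 4)
      have htl : (PySem.Str.join " | "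
          (PySem.List.slice ((PySem.Str.splitlines raw).filterMap pvNormalizeOptionalText) none (some 4))).toList
          = pvScan raw.toList [] false false 0 := by
        rw [hslice, PySem.Str.toList_join]
        rw [show (" | " : String).toList = [' ', '|', ' '] from rfl]
        rw [List.map_take, hclean, ← List.map_take]
        rw [hscan, pvTop]
      rw [← htl, String.ofList_toList]
    rw [if_neg hc0, if_neg hscanne, hcand]

-- ===== VERDICT (by name: the statement is the Claim_ definition above) =====
theorem normalize_skool_entry_py_spec : Claim_equal_normalize_skool_entry_py := by
  intro raw_value h
  exact pv_main raw_value h
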